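-- pv_equiv track=rewrite | github.com/Elmir-Zeynalov/IN5410-EnergyManagement-Project | optimization_task1.py | set_operation_time
-- ===== SOURCE A (Python) =====
-- h = 23
--
-- appliance_count = 3
--
-- def set_operation_time(appliance, start, end):
--     daily_usage = [0] * h
--     daily_usage[start:end] = [1] * (end - start)
--
--     for i in range(appliance):
--         daily_usage = add_padding(True, daily_usage)
--
--     for i in range(appliance_count - 1 - appliance):
--         daily_usage = add_padding(False, daily_usage)
--
--     return daily_usage
--
-- def add_padding(pading_left, appliance_usage):
--     if pading_left == True:
--         padded_result = [0] * h + appliance_usage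
--     else:
--         padded_result = appliance_usage + [0] * h
--     return padded_result
-- ===== SOURCE B (Python) =====
-- h = 23
--
-- appliance_count = 3
--
-- def set_operation_time(appliance, start, end):
--     daily_usage = [0] * h
--     daily_usage[start:end] = [1] * (end - start)
--     left = max(0, appliance)
--     right = max(0, appliance_count - 1 - appliance)
--     return [0] * (h * left) + daily_usage + [0] * (h * right)
-- ===== Notes on version B (the rewrite author's own statement) =====
-- stated objective: simpler
-- what changed: Replaces the two padding loops and the add_padding helper by one closed-form concatenation: [0]*(h*max(0,appliance)) + base + [0]*(h*max(0,appliance_count-1-appliance)), keeping the slice-assigned base vector verbatim.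
import Mathlib
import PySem

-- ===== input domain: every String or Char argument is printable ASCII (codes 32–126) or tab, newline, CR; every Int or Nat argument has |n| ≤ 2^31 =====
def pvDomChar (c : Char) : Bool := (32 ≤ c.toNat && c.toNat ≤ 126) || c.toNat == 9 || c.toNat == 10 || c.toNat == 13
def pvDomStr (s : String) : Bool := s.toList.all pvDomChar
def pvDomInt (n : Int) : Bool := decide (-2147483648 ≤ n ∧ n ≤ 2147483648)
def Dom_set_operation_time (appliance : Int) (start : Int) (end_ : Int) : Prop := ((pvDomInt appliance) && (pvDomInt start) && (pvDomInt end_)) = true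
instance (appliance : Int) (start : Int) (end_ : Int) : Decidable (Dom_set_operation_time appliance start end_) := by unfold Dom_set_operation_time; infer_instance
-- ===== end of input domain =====

-- B replaces A's two add_padding loops by one closed-form concatenation of zero blocks (objective: simpler).

-- ===== PORT A =====
-- Python list-slice assignment xs[a:b] = v (exact: clamp both bounds to [0,len], stop ≥ start).
def pySetSlice (xs : List Int) (a b : Int) (v : List Int) : List Int :=
  let a' := PySem.List.clampIdx xs.length a
  let b' := max a' (PySem.List.clampIdx xs.length b)
  xs.take a' ++ v ++ xs.drop b'

def add_padding (pading_left : Bool) (appliance_usage : List Int) : List Int :=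
  if pading_left == true then List.replicate 23 0 ++ appliance_usage
  else appliance_usage ++ List.replicate 23 0

def set_operation_time (appliance : Int) (start : Int) (end_ : Int) : List Int :=
  let d0 := pySetSlice (List.replicate 23 0) start end_ (List.replicate (end_ - start).toNat 1)
  let d1 := (PySem.List.pyRange 0 appliance 1).foldl (fun d _ => add_padding true d) d0
  (PySem.List.pyRange 0 (3 - 1 - appliance) 1).foldl (fun d _ => add_padding false d) d1

-- ===== PORT B =====
def set_operation_time_alt (appliance : Int) (start : Int) (end_ : Int) : List Int :=
  let daily := pySetSlice (List.replicate 23 0) start end_ (List.replicate (end_ - start).toNat 1)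
  let left := max 0 appliance
  let right := max 0 (3 - 1 - appliance)
  List.replicate (23 * left).toNat 0 ++ daily ++ List.replicate (23 * right).toNat 0

-- ===== PRECONDITION & SPEC =====
def Spec_set_operation_time (appliance : Int) (start : Int) (end_ : Int) (out : List Int) : Prop := out = set_operation_time_alt appliance start end_
instance (appliance : Int) (start : Int) (end_ : Int) (out : List Int) : Decidable (Spec_set_operation_time appliance start end_ out) := by unfold Spec_set_operation_time; infer_instance

-- ===== CLAIM (what is proved, stated in full; the proofs are below) =====
def Claim_equal_set_operation_time : Prop := ∀ (appliance : Int) (start : Int) (end_ : Int), Dom_set_operation_time appliance start end_ → Spec_set_operation_time appliance start end_ (set_operation_time appliance start end_)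

-- ===== LEMMAS AND PROOFS =====
theorem foldl_pad_left (l : List Int) (d : List Int) :
    l.foldl (fun d _ => add_padding true d) d = List.replicate (23 * l.length) 0 ++ d := by
  induction l generalizing d with
  | nil => simp
  | cons x t ih =>
      rw [List.foldl_cons, ih, show add_padding true d = List.replicate 23 0 ++ d from rfl,
          List.length_cons, show 23 * (t.length + 1) = 23 * t.length + 23 by ring,
          List.replicate_add, List.append_assoc]

theorem foldl_pad_right (l : List Int) (d : List Int) :
    l.foldl (fun d _ => add_padding false d) d = d ++ List.replicate (23 * l.length) 0 := by
  induction l generalizing d with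
  | nil => simp
  | cons x t ih =>
      rw [List.foldl_cons, ih, show add_padding false d = d ++ List.replicate 23 0 from rfl,
          List.length_cons, show 23 * (t.length + 1) = 23 + 23 * t.length by ring,
          List.replicate_add, List.append_assoc]

theorem replicate_count (x : Int) : 23 * x.toNat = (23 * max 0 x).toNat := by omega

-- ===== VERDICT (by name: the statement is the Claim_ definition above) =====
theorem set_operation_time_spec : Claim_equal_set_operation_time := by
  intro appliance start end_ _
  unfold Spec_set_operation_time set_operation_time set_operation_time_alt
  dsimp only
  rw [foldl_pad_left, foldl_pad_right, PySem.List.length_pyRange_one,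
      PySem.List.length_pyRange_one]
  simp only [Int.sub_zero, replicate_count, List.append_assoc]
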